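-- pv_equiv track=rewrite | github.com/niknarra/LeetCode-and-other-solutions | Stacks-and-Queues/Count_NGEs_to_the_Right.py | count_NGEs
-- ===== SOURCE A (Python) =====
-- def count_NGEs(N, arr, queries, indices):
--     # Code here
--
--     nge_counts = [0] * N
--
--     # Stack to store indices of elements
--     st = []
--
--     # Iterate over the array from right to left
--     for i in range(N-1, -1, -1):
--         # Pop elements from the stack that are smaller than the current element
--         while st and arr[st[-1]] <= arr[i]:
--             st.pop()
--
--         # The number of elements greater than arr[i] to its right
--         nge_counts[i] = len(st)
--
--         # Push the current element index to the stack
--         st.append(i)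
--
--     # Answer the queries based on the precomputed nge_counts
--     ans = []
--     for index in indices:
--         ans.append(nge_counts[index])
--
--     return ans
-- ===== SOURCE B (Python) =====
-- def count_NGEs(N, arr, queries, indices):
--     # B: stack-free pointer-jumping — find each next-strictly-greater index by
--     # hopping along the already-computed links to the right, memoizing chain
--     # counts along the way; then answer queries from the counts table.
--     nge = [-1] * N
--     counts = [0] * N
--     for i in range(N - 2, -1, -1):
--         j = i + 1
--         while j != -1 and arr[j] <= arr[i]:
--             j = nge[j]
--         nge[i] = j
--         if j != -1:
--             counts[i] = 1 + counts[j]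
--     return [counts[index] for index in indices]
-- ===== Notes on version B (the rewrite author's own statement) =====
-- stated objective: alternative
-- what changed: A maintains a monotonic stack of indices and reads its live size; B uses no stack at all: it finds each next-strictly-greater index by pointer-jumping along the already-computed nge links and memoizes chain counts as counts[i] = 1 + counts[nge[i]], then maps the queries.
import Mathlib
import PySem

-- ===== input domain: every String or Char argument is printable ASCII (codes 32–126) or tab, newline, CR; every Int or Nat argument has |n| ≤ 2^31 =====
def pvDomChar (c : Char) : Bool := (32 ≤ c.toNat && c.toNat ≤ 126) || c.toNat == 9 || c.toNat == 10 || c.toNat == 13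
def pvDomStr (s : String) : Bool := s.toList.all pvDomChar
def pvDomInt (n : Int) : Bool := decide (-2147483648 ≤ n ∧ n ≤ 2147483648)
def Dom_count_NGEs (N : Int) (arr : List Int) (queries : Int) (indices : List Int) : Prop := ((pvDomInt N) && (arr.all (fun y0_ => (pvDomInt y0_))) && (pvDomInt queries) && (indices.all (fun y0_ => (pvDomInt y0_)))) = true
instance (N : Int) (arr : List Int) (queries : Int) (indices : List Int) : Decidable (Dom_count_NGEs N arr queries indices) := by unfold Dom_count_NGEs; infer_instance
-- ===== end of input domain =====

-- B replaces A's fused monotonic-stack pass by a stack-free pointer-jumping pass: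
-- nge links found by hopping along already-computed links, counts memoized from them.


-- ===== PORT A =====
-- Stack is a Lean list with the TOP at the HEAD (Python append/pop/st[-1] act at the end).
-- 'while st and arr[st[-1]] <= arr[i]: st.pop()' — arr reads via pyGetD (exact: Pre_ keeps every index in range).
def pvPopA (arr : List Int) (x : Int) : List Int → List Int
  | [] => []
  | j :: st => if PySem.List.pyGetD arr j 0 ≤ x then pvPopA arr x st else j :: st

def count_NGEs (N : Int) (arr : List Int) (queries : Int) (indices : List Int) : List Int :=
  -- nge_counts = [0] * N  (empty for N ≤ 0, as in Python)
  let s := (PySem.List.pyRange (N - 1) (-1) (-1)).foldl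
    (fun (s : List Int × List Int) i =>
      let st := pvPopA arr (PySem.List.pyGetD arr i 0) s.2
      (PySem.List.pySetD s.1 i (Int.ofNat st.length), i :: st))
    (List.replicate N.toNat 0, [])
  indices.foldl (fun ans index => ans ++ [PySem.List.pyGetD s.1 index 0]) []

-- ===== PORT B =====
-- 'j = i+1; while j != -1 and arr[j] <= arr[i]: j = nge[j]' — the hop count is at most
-- the length of the link chain, which is < N, so fuel N.toNat makes this loop exact.
def pvJump (arr nge : List Int) (x : Int) : Nat → Int → Int
  | 0, j => j
  | fuel + 1, j =>
    if j ≠ -1 ∧ PySem.List.pyGetD arr j 0 ≤ x then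
      pvJump arr nge x fuel (PySem.List.pyGetD nge j (-1))
    else j

def count_NGEs_alt (N : Int) (arr : List Int) (queries : Int) (indices : List Int) : List Int :=
  -- state p = (nge, counts); loop over i = N-2 … 0
  let p := (PySem.List.pyRange (N - 2) (-1) (-1)).foldl
    (fun (p : List Int × List Int) i =>
      let j := pvJump arr p.1 (PySem.List.pyGetD arr i 0) N.toNat (i + 1)
      (PySem.List.pySetD p.1 i j,
       if j ≠ -1 then PySem.List.pySetD p.2 i (1 + PySem.List.pyGetD p.2 j 0) else p.2))
    (List.replicate N.toNat (-1), List.replicate N.toNat 0)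
  indices.map (fun index => PySem.List.pyGetD p.2 index 0)

-- ===== PRECONDITION & SPEC =====
-- Pre_ = exactly the inputs where A raises no IndexError: the scanned prefix must
-- exist (N ≤ len(arr); for N ≤ 1 the loop never reads arr, so arr may be shorter)
-- and every query index must be a valid (possibly negative) index into the
-- length-N counts list.
def Pre_count_NGEs (N : Int) (arr : List Int) (queries : Int) (indices : List Int) : Prop :=
  (N ≤ 1 ∨ N ≤ (arr.length : Int)) ∧ ∀ idx ∈ indices, -N ≤ idx ∧ idx < N
instance (N : Int) (arr : List Int) (queries : Int) (indices : List Int) : Decidable (Pre_count_NGEs N arr queries indices) := by unfold Pre_count_NGEs; infer_instance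

def pvWitness_count_NGEs : Int × List Int × Int × List Int := (4, [2, 1, 3, 1], 2, [0, -1, 2, 1])

def Spec_count_NGEs (N : Int) (arr : List Int) (queries : Int) (indices : List Int) (out : List Int) : Prop := out = count_NGEs_alt N arr queries indices
instance (N : Int) (arr : List Int) (queries : Int) (indices : List Int) (out : List Int) : Decidable (Spec_count_NGEs N arr queries indices out) := by unfold Spec_count_NGEs; infer_instance

-- ===== CLAIM (what is proved, stated in full; the proofs are below) =====
def Claim_equal_count_NGEs : Prop := ∀ (N : Int) (arr : List Int) (queries : Int) (indices : List Int), Dom_count_NGEs N arr queries indices → Pre_count_NGEs N arr queries indices → Spec_count_NGEs N arr queries indices (count_NGEs N arr queries indices)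

-- ===== LEMMAS AND PROOFS =====

-- one step of A's fused pass and the recursion it folds into
def pvStepA (arr : List Int) (s : List Int × List Int) (i : Int) : List Int × List Int :=
  (PySem.List.pySetD s.1 i (Int.ofNat (pvPopA arr (PySem.List.pyGetD arr i 0) s.2).length),
   i :: pvPopA arr (PySem.List.pyGetD arr i 0) s.2)

def pvProcA (arr : List Int) : Nat → List Int × List Int → List Int × List Int
  | 0, s => s
  | k+1, s => pvProcA arr k (pvStepA arr s (k : Int))

-- one step of B's jump pass and its recursion
def pvStepJ (arr : List Int) (fuel : Nat) (p : List Int × List Int) (i : Int) : List Int × List Int :=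
  let j := pvJump arr p.1 (PySem.List.pyGetD arr i 0) fuel (i + 1)
  (PySem.List.pySetD p.1 i j,
   if j ≠ -1 then PySem.List.pySetD p.2 i (1 + PySem.List.pyGetD p.2 j 0) else p.2)

def pvProcJ (arr : List Int) (fuel : Nat) : Nat → List Int × List Int → List Int × List Int
  | 0, p => p
  | k+1, p => pvProcJ arr fuel k (pvStepJ arr fuel p (k : Int))

theorem fold_pvProcA (arr : List Int) : ∀ (k : Nat) (s : List Int × List Int),
    List.foldl (pvStepA arr) s (PySem.List.pyRange ((k : Int) - 1) (-1) (-1)) = pvProcA arr k s := by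
  intro k
  induction k with
  | zero => intro s; rw [PySem.List.pyRange_neg_one_eq_nil (by omega)]; rfl
  | succ k ih =>
    intro s
    rw [PySem.List.pyRange_neg_one_cons (by omega)]
    have h2 : ((k + 1 : Nat) : Int) - 1 = (k : Int) := by push_cast; omega
    simp only [List.foldl_cons, h2, pvProcA]
    rw [ih]

theorem fold_pvProcJ (arr : List Int) (fuel : Nat) : ∀ (k : Nat) (p : List Int × List Int),
    List.foldl (pvStepJ arr fuel) p (PySem.List.pyRange ((k : Int) - 1) (-1) (-1)) = pvProcJ arr fuel k p := by
  intro k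
  induction k with
  | zero => intro p; rw [PySem.List.pyRange_neg_one_eq_nil (by omega)]; rfl
  | succ k ih =>
    intro p
    rw [PySem.List.pyRange_neg_one_cons (by omega)]
    have h2 : ((k + 1 : Nat) : Int) - 1 = (k : Int) := by push_cast; omega
    simp only [List.foldl_cons, h2, pvProcJ]
    rw [ih]

-- stack shape: ascending indices, all in [m, n)
def pvAsc (n : Nat) (m : Int) : List Int → Prop
  | [] => True
  | j :: t => m ≤ j ∧ j < (n : Int) ∧ pvAsc n (j + 1) t

-- the nge table links each stack element to the one below it
def pvLinked (g : List Int) : List Int → Prop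
  | [] => True
  | [j] => g.getD j.toNat (-1) = -1
  | j :: j' :: t => g.getD j.toNat (-1) = j' ∧ pvLinked g (j' :: t)

-- A's count table stores, at each stack element, the number of elements below it
def pvCnt (cA : List Int) : List Int → Prop
  | [] => True
  | j :: t => cA.getD j.toNat 0 = (t.length : Int) ∧ pvCnt cA t

theorem pvAsc_mono (n : Nat) (m m' : Int) (st : List Int) (h : m ≤ m') (ha : pvAsc n m' st) : pvAsc n m st := by
  cases st with
  | nil => trivial
  | cons j t => exact ⟨le_trans h ha.1, ha.2.1, ha.2.2⟩

theorem pvAsc_pop (n : Nat) (arr : List Int) (x m : Int) :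
    ∀ st : List Int, pvAsc n m st → pvAsc n m (pvPopA arr x st) := by
  intro st
  induction st generalizing m with
  | nil => intro _; trivial
  | cons j t ih =>
    intro h
    simp only [pvPopA]
    split
    · exact ih m (pvAsc_mono n m (j + 1) t (by linarith [h.1]) h.2.2)
    · exact h

theorem pvAsc_mem (n : Nat) : ∀ (st : List Int) (m j : Int), pvAsc n m st → j ∈ st →
    m ≤ j ∧ j < (n : Int) := by
  intro st
  induction st with
  | nil => intro m j _ hj; exact absurd hj (by simp)
  | cons a t ih =>
    intro m j h hj
    rcases List.mem_cons.mp hj with rfl | hj'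
    · exact ⟨h.1, h.2.1⟩
    · have := ih (a + 1) j h.2.2 hj'
      exact ⟨by linarith [h.1, this.1], this.2⟩

theorem pvAsc_length (n : Nat) : ∀ (st : List Int) (m : Int), pvAsc n m st → st ≠ [] →
    (st.length : Int) + m ≤ (n : Int) := by
  intro st
  induction st with
  | nil => intro m _ h; exact absurd rfl h
  | cons j t ih =>
    intro m h _
    cases t with
    | nil => simp; linarith [h.1, h.2.1]
    | cons j' t' =>
      have := ih (j + 1) h.2.2 (by simp)
      have h1 := h.1
      simp at this ⊢
      omega

theorem pvLinked_pop (g arr : List Int) (x : Int) :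
    ∀ st : List Int, pvLinked g st → pvLinked g (pvPopA arr x st) := by
  intro st
  induction st with
  | nil => intro _; trivial
  | cons j t ih =>
    intro h
    simp only [pvPopA]
    split
    · apply ih
      cases t with
      | nil => trivial
      | cons j' t' => exact h.2
    · exact h

theorem pvLinked_congr (g g' : List Int) :
    ∀ st : List Int, (∀ j ∈ st, g'.getD j.toNat (-1) = g.getD j.toNat (-1)) →
    pvLinked g st → pvLinked g' st := by
  intro st
  induction st with
  | nil => intro _ _; trivial
  | cons j t ih =>
    intro hag h
    cases t with
    | nil =>
      have h' : List.getD g j.toNat (-1) = -1 := h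
      show List.getD g' j.toNat (-1) = -1
      rw [hag j (by simp)]; exact h'
    | cons j' t' =>
      exact ⟨by rw [hag j (by simp)]; exact h.1, ih (fun a ha => hag a (by simp [ha])) h.2⟩

theorem pvCnt_pop (cA arr : List Int) (x : Int) :
    ∀ st : List Int, pvCnt cA st → pvCnt cA (pvPopA arr x st) := by
  intro st
  induction st with
  | nil => intro _; trivial
  | cons j t ih =>
    intro h
    simp only [pvPopA]
    split
    · exact ih h.2
    · exact h

theorem pvCnt_congr (cA cA' : List Int) :
    ∀ st : List Int, (∀ j ∈ st, cA'.getD j.toNat 0 = cA.getD j.toNat 0) →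
    pvCnt cA st → pvCnt cA' st := by
  intro st
  induction st with
  | nil => intro _ _; trivial
  | cons j t ih =>
    intro hag h
    exact ⟨by rw [hag j (by simp)]; exact h.1, ih (fun a ha => hag a (by simp [ha])) h.2⟩

theorem pvGetD_set_self (xs : List Int) (k : Nat) (v d : Int) (h : k < xs.length) :
    (xs.set k v).getD k d = v := by
  simp [List.getD, h]

theorem pvGetD_set_ne (xs : List Int) (k j : Nat) (v d : Int) (h : k ≠ j) :
    (xs.set k v).getD j d = xs.getD j d := by
  simp [List.getD, h]

-- B's jump along the links computes exactly the head of A's popped stack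
theorem pvJump_pop (n : Nat) (arr g : List Int) (x : Int) :
    ∀ (st : List Int) (fuel : Nat), st.length ≤ fuel → pvLinked g st →
    (∀ j ∈ st, 0 ≤ j) →
    pvJump arr g x fuel (st.headD (-1)) = (pvPopA arr x st).headD (-1) := by
  intro st
  induction st with
  | nil =>
    intro fuel _ _ _
    cases fuel with
    | zero => rfl
    | succ fuel => simp [pvJump, pvPopA]
  | cons j t ih =>
    intro fuel hlen hlink hpos
    cases fuel with
    | zero => simp at hlen
    | succ fuel =>
      have hj0 : 0 ≤ j := hpos j (by simp)
      have hjne : j ≠ -1 := by omega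
      simp only [List.headD, pvJump, pvPopA]
      by_cases hle : PySem.List.pyGetD arr j 0 ≤ x
      · rw [if_pos ⟨hjne, hle⟩, if_pos hle]
        have hgj : PySem.List.pyGetD g j (-1) = g.getD j.toNat (-1) := by
          have hcast : j = ((j.toNat : Nat) : Int) := by omega
          conv_lhs => rw [hcast]
          rw [PySem.List.pyGetD_natCast]
        have hlinkt : pvLinked g t := by
          cases t with
          | nil => trivial
          | cons j' t' => exact hlink.2
        have hheadt : g.getD j.toNat (-1) = t.headD (-1) := by
          cases t with
          | nil => exact hlink
          | cons j' t' => exact hlink.1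
        rw [hgj, hheadt]
        exact ih fuel (by simp at hlen ⊢; omega) hlinkt (fun a ha => hpos a (by simp [ha]))
      · rw [if_neg (by rintro ⟨_, h⟩; exact hle h), if_neg hle]

-- the joint invariant: state after both passes have processed every index ≥ k
def pvInvJ (n k : Nat) (cA st g c : List Int) : Prop :=
  cA.length = n ∧ g.length = n ∧ c.length = n ∧
  st.headD (-1) = (k : Int) ∧ st ≠ [] ∧
  pvAsc n (k : Int) st ∧ pvLinked g st ∧ pvCnt cA st ∧
  (∀ j : Nat, k ≤ j → j < n → c.getD j 0 = cA.getD j 0) ∧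
  (∀ j : Nat, j < k → c.getD j 0 = 0)

theorem pvJoint (n : Nat) (arr : List Int) :
    ∀ (k : Nat) (cA st g c : List Int), pvInvJ n k cA st g c →
    (pvProcA arr k (cA, st)).1.length = n ∧ (pvProcJ arr n k (g, c)).2.length = n ∧
    ∀ j : Nat, j < n → (pvProcJ arr n k (g, c)).2.getD j 0 = (pvProcA arr k (cA, st)).1.getD j 0 := by
  intro k
  induction k with
  | zero =>
    intro cA st g c hinv
    exact ⟨hinv.1, hinv.2.2.1, fun j hj => hinv.2.2.2.2.2.2.2.2.1 j (Nat.zero_le j) hj⟩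
  | succ k ih =>
    intro cA st g c hinv
    obtain ⟨hlA, hlG, hlC, hhead, hne, hasc, hlink, hcnt, heq, hzero⟩ := hinv
    -- k+1 < n since the head of st is k+1 and stack entries are < n
    have hkn : k + 1 < n := by
      have h1 : st.headD (-1) ∈ st ∨ st = [] := by
        cases st with
        | nil => exact Or.inr rfl
        | cons a t => exact Or.inl (by simp)
      rcases h1 with h1 | h1
      · have := pvAsc_mem n st ((k+1 : Nat) : Int) _ hasc h1
        rw [hhead] at this
        omega
      · exact absurd h1 hne
    set x := PySem.List.pyGetD arr (k : Int) 0 with hx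
    set st' := pvPopA arr x st with hst'
    have hcast : ((k + 1 : Nat) : Int) = (k : Int) + 1 := by push_cast; ring
    have hasc' : pvAsc n ((k : Int) + 1) st' := by
      rw [hst']; rw [← hcast]; exact pvAsc_pop n arr x _ st hasc
    have hmem' : ∀ j ∈ st', (k : Int) + 1 ≤ j ∧ j < (n : Int) :=
      fun j hj => pvAsc_mem n st' ((k : Int) + 1) j hasc' hj
    have hlink' : pvLinked g st' := hst' ▸ pvLinked_pop g arr x st hlink
    have hcnt' : pvCnt cA st' := hst' ▸ pvCnt_pop cA arr x st hcnt
    -- jump = head of popped stack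
    have hstlen : st.length ≤ n := by
      have := pvAsc_length n st ((k+1 : Nat) : Int) hasc hne
      omega
    have hpos : ∀ j ∈ st, 0 ≤ j := by
      intro j hj
      have := pvAsc_mem n st ((k+1 : Nat) : Int) j hasc hj
      omega
    set jst : Int := st'.headD (-1) with hjst
    have hjump : pvJump arr g x n ((k : Int) + 1) = jst := by
      rw [← hcast, ← hhead]
      exact pvJump_pop n arr g x st n hstlen hlink hpos
    -- the new states after one step
    set cA₁ := cA.set k (Int.ofNat st'.length) with hcA₁
    set g₁ := g.set k jst with hg₁
    set c₁ := (if jst ≠ -1 then PySem.List.pySetD c (k : Int) (1 + PySem.List.pyGetD c jst 0) else c) with hc₁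
    have hstepA : pvProcA arr (k + 1) (cA, st) = pvProcA arr k (cA₁, (k : Int) :: st') := by
      simp only [pvProcA, pvStepA]
      rw [← hx, ← hst', hcA₁]
      simp
    have hstepJ : pvProcJ arr n (k + 1) (g, c) = pvProcJ arr n k (g₁, c₁) := by
      simp only [pvProcJ, pvStepJ]
      rw [← hx, hjump, hg₁, hc₁]
      simp
    rw [hstepA, hstepJ]
    -- establish the invariant at k
    apply ih cA₁ ((k : Int) :: st') g₁ c₁
    have hgag : ∀ j : Nat, j ≠ k → g₁.getD j (-1) = g.getD j (-1) :=
      fun j hj => pvGetD_set_ne g k j jst (-1) (Ne.symm hj)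
    have hgk : g₁.getD k (-1) = jst := pvGetD_set_self g k jst (-1) (by omega)
    have hC₁len : c₁.length = n := by
      rw [hc₁]; split
      · simp [hlC]
      · exact hlC
    have hcAk : cA₁.getD k 0 = (st'.length : Int) := by
      rw [hcA₁, pvGetD_set_self cA k _ 0 (by omega)]; simp
    have hcAne : ∀ j : Nat, j ≠ k → cA₁.getD j 0 = cA.getD j 0 :=
      fun j hj => pvGetD_set_ne cA k j _ 0 (Ne.symm hj)
    -- c₁ agrees with cA₁ at every index ≥ k
    have hc₁eq : ∀ j : Nat, k ≤ j → j < n → c₁.getD j 0 = cA₁.getD j 0 := by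
      intro j hj hjn
      by_cases hjk : j = k
      · rw [hjk]
        match hste : st' with
        | [] =>
          have hjm1 : jst = -1 := by simp [hjst]
          rw [hc₁, if_neg (by simp [hjm1]), hcAk]
          simpa using hzero k (by omega)
        | j₀ :: t =>
          have hj₀ : (k : Int) + 1 ≤ j₀ ∧ j₀ < (n : Int) := hmem' j₀ (by simp)
          have hjval : jst = j₀ := by simp [hjst]
          have hnn : jst ≠ -1 := by rw [hjval]; omega
          have hgetc : PySem.List.pyGetD c jst 0 = c.getD jst.toNat 0 := by
            have hcst : jst = ((jst.toNat : Nat) : Int) := by rw [hjval]; omega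
            conv_lhs => rw [hcst]
            rw [PySem.List.pyGetD_natCast]
          have hcj₀ : c.getD jst.toNat 0 = (t.length : Int) := by
            rw [heq jst.toNat (by rw [hjval]; omega) (by rw [hjval]; omega), hjval]
            exact hcnt'.1
          rw [hc₁, if_pos hnn]
          have hset : PySem.List.pySetD c (↑k) (1 + PySem.List.pyGetD c jst 0) = c.set k (1 + PySem.List.pyGetD c jst 0) := by simp
          rw [hset, pvGetD_set_self c k _ 0 (by omega), hgetc, hcj₀, hcAk, List.length_cons]
          push_cast
          ring
      · have hjk1 : k + 1 ≤ j := by omega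
        have hcne : c₁.getD j 0 = c.getD j 0 := by
          rw [hc₁]; split
          · have hset : PySem.List.pySetD c (↑k) (1 + PySem.List.pyGetD c jst 0) = c.set k (1 + PySem.List.pyGetD c jst 0) := by simp
            rw [hset, pvGetD_set_ne c k j _ 0 (Ne.symm hjk)]
          · rfl
        rw [hcne, hcAne j hjk, heq j hjk1 hjn]
    refine ⟨by simp [hcA₁, hlA], by simp [hg₁, hlG], hC₁len, by simp, by simp, ?_, ?_, ?_, hc₁eq, ?_⟩
    · -- pvAsc n k (k :: st')
      exact ⟨le_refl _, by exact_mod_cast (by omega : k < n), hasc'⟩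
    · -- pvLinked g₁ (k :: st')
      have hlink₁ : pvLinked g₁ st' := by
        apply pvLinked_congr g g₁ st' _ hlink'
        intro j hj
        apply hgag
        have := (hmem' j hj).1
        omega
      match hste : st' with
      | [] =>
        show List.getD g₁ ((k : Int)).toNat (-1) = -1
        rw [Int.toNat_natCast, hgk]
        simp [hjst]
      | j₀ :: t =>
        refine ⟨?_, hlink₁⟩
        show List.getD g₁ ((k : Int)).toNat (-1) = j₀
        rw [Int.toNat_natCast, hgk]
        simp [hjst]
    · -- pvCnt cA₁ (k :: st')
      refine ⟨?_, ?_⟩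
      · show List.getD cA₁ ((k : Int)).toNat 0 = (st'.length : Int)
        rw [Int.toNat_natCast, hcAk]
      · apply pvCnt_congr cA cA₁ st' _ hcnt'
        intro j hj
        apply hcAne
        have := (hmem' j hj).1
        omega
    · -- zeros below k
      intro j hj
      have hcne : c₁.getD j 0 = c.getD j 0 := by
        rw [hc₁]; split
        · have hset : PySem.List.pySetD c (↑k) (1 + PySem.List.pyGetD c jst 0) = c.set k (1 + PySem.List.pyGetD c jst 0) := by simp
          rw [hset, pvGetD_set_ne c k j _ 0 (by omega)]
        · rfl
      rw [hcne]
      exact hzero j (by omega)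

-- ===== VERDICT (by name: the statement is the Claim_ definition above) =====
theorem count_NGEs_spec : Claim_equal_count_NGEs := by
  intro N arr queries indices _ _
  show count_NGEs N arr queries indices = count_NGEs_alt N arr queries indices
  unfold count_NGEs count_NGEs_alt
  simp only []
  have hfA : (fun (s : List Int × List Int) i =>
      (PySem.List.pySetD s.1 i (Int.ofNat (pvPopA arr (PySem.List.pyGetD arr i 0) s.2).length),
        i :: pvPopA arr (PySem.List.pyGetD arr i 0) s.2)) = pvStepA arr := rfl
  have hfJ : (fun (p : List Int × List Int) i =>
      (PySem.List.pySetD p.1 i (pvJump arr p.1 (PySem.List.pyGetD arr i 0) N.toNat (i + 1)),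
        if pvJump arr p.1 (PySem.List.pyGetD arr i 0) N.toNat (i + 1) ≠ -1 then
          PySem.List.pySetD p.2 i (1 + PySem.List.pyGetD p.2 (pvJump arr p.1 (PySem.List.pyGetD arr i 0) N.toNat (i + 1)) 0)
        else p.2)) = pvStepJ arr N.toNat := rfl
  set n := N.toNat with hn
  by_cases hN : 1 ≤ N
  · -- n = m + 1 ≥ 1
    obtain ⟨m, hm⟩ : ∃ m : Nat, n = m + 1 := ⟨n - 1, by omega⟩
    have hNn : N = (n : Int) := by omega
    have hr1 : PySem.List.pyRange (N - 1) (-1) (-1) = PySem.List.pyRange ((n : Int) - 1) (-1) (-1) := by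
      rw [hNn]
    have hr2 : PySem.List.pyRange (N - 2) (-1) (-1) = PySem.List.pyRange ((m : Int) - 1) (-1) (-1) := by
      congr 1
      omega
    rw [hr1, hr2, hfA, hfJ, fold_pvProcA arr n, fold_pvProcJ arr n m]
    -- unfold A's first step (index n-1 = m)
    have hA1 : pvProcA arr n (List.replicate n 0, []) =
        pvProcA arr m ((List.replicate n (0:Int)).set m 0, [(m : Int)]) := by
      rw [hm]
      simp only [pvProcA, pvStepA, pvPopA]
      congr 2
      simp
    rw [hA1]
    have hjoint := pvJoint n arr m ((List.replicate n (0:Int)).set m 0) [(m : Int)]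
      (List.replicate n (-1)) (List.replicate n 0)
      ⟨by simp, by simp, by simp, by simp, by simp,
       ⟨le_refl _, by exact_mod_cast (by omega : m < n), trivial⟩,
       by show List.getD (List.replicate n (-1:Int)) ((m:Int)).toNat (-1) = -1; simp,
       ⟨by
          show List.getD ((List.replicate n (0:Int)).set m 0) ((m:Int)).toNat 0 = ((List.length ([] : List Int) : Nat) : Int)
          rw [Int.toNat_natCast,
            pvGetD_set_self (List.replicate n (0:Int)) m 0 0 (by rw [List.length_replicate]; omega)]
          rfl, trivial⟩,
       by intro j hj hjn; simp [List.set_replicate_self],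
       by intro j hj; simp⟩
    obtain ⟨hlenA, hlenJ, hele⟩ := hjoint
    have htab : (pvProcJ arr n m (List.replicate n (-1), List.replicate n 0)).2 =
        (pvProcA arr m ((List.replicate n (0:Int)).set m 0, [(m : Int)])).1 := by
      apply List.ext_getElem
      · rw [hlenA, hlenJ]
      · intro i h1 h2
        have hin : i < n := by rw [hlenJ] at h1; exact h1
        have e1 := (List.getD_eq_getElem (pvProcJ arr n m (List.replicate n (-1), List.replicate n 0)).2 0 h1).symm
        have e2 := (List.getD_eq_getElem (pvProcA arr m ((List.replicate n (0:Int)).set m 0, [(m : Int)])).1 0 h2).symm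
        rw [e1, e2, hele i hin]
    rw [PySem.List.foldl_append_singleton_eq_map, htab]
    simp
  · -- N ≤ 0 → n = 0, both tables are []
    have hn0 : n = 0 := by omega
    rw [PySem.List.pyRange_neg_one_eq_nil (by omega : N - 1 ≤ -1),
        PySem.List.pyRange_neg_one_eq_nil (by omega : N - 2 ≤ -1)]
    simp only [List.foldl_nil, hn0]
    rw [PySem.List.foldl_append_singleton_eq_map]
    simp
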